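-- pv_equiv track=rewrite | github.com/sweepai/sweep | tests/archive/test_diff_code.py | git_conflict_format
-- ===== SOURCE A (Python) =====
-- def git_conflict_format(diff_str):
--     lines = diff_str.split("\n")
--     output = []
--     state = "neutral"
--
--     UPDATED_MARKER = ">>>>>>> UPDATED"
--     ORIGINAL_MARKER = "<<<<<<< ORIGINAL"
--     SEPARATOR_MARKER = "======="
--
--     for line in lines:
--         if line.startswith("  "):
--             if state == "add":
--                 output.append(UPDATED_MARKER)
--             elif state == "del":
--                 output.extend([SEPARATOR_MARKER, UPDATED_MARKER])
--             output.append(line[2:])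
--             state = "neutral"
--         elif line.startswith("- "):
--             if state == "neutral":
--                 output.append(ORIGINAL_MARKER)
--             elif state == "add":
--                 output.extend([UPDATED_MARKER, ORIGINAL_MARKER])
--             output.append(line[2:])
--             state = "del"
--         elif line.startswith("+ "):
--             if state == "del":
--                 output.append(SEPARATOR_MARKER)
--             elif state == "neutral":
--                 output.extend([ORIGINAL_MARKER, SEPARATOR_MARKER])
--             output.append(line[2:])
--             state = "add"
--
--     if state == "add":
--         output.append(UPDATED_MARKER)
--     elif state == "del":
--         output.extend([SEPARATOR_MARKER, UPDATED_MARKER])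
--
--     return "\n".join(output)
-- ===== SOURCE B (Python) =====
-- def git_conflict_format(diff_str):
--     lines = diff_str.split("\n")
--     n = len(lines)
--     out = []
--     i = 0
--     while i < n:
--         line = lines[i]
--         if line.startswith("  "):
--             out.append(line[2:])
--             i += 1
--         elif line.startswith("- ") or line.startswith("+ "):
--             dels = []
--             while i < n and not lines[i].startswith("  ") and not lines[i].startswith("+ "):
--                 if lines[i].startswith("- "):
--                     dels.append(lines[i][2:])
--                 i += 1
--             adds = []
--             while i < n and not lines[i].startswith("  ") and not lines[i].startswith("- "):
--                 if lines[i].startswith("+ "):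
--                     adds.append(lines[i][2:])
--                 i += 1
--             out.append("<<<<<<< ORIGINAL")
--             out.extend(dels)
--             out.append("=======")
--             out.extend(adds)
--             out.append(">>>>>>> UPDATED")
--         else:
--             i += 1
--     return "\n".join(out)
-- ===== Notes on version B (the rewrite author's own statement) =====
-- stated objective: alternative
-- what changed: Replaces A's three-state transition machine (state carried across a single fold, with marker emission rules per transition) by a block-consuming outer loop that, on meeting a deletion or addition line, runs two inner loops collecting the del and add lines of the whole conflict block and then emits the markers around the collected block in one place.
import Mathlib
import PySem

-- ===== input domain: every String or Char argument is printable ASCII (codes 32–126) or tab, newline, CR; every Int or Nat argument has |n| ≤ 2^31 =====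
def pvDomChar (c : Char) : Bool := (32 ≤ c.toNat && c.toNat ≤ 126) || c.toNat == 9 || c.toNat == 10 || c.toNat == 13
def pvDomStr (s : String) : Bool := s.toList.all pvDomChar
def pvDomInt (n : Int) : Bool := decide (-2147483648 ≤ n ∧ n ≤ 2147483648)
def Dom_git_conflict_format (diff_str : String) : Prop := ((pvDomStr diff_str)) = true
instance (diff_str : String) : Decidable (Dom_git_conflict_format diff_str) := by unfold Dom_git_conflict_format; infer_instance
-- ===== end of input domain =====

-- B replaces A's three-state transition machine by a block-consuming loop (two inner
-- collection loops per conflict block); same O(n) cost, different decomposition.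

-- ===== PORT A =====
-- one iteration of A's for-loop: state is (output, state-string)
def pvStepA (acc : List String × String) (line : String) : List String × String :=
  if PySem.Str.startswith line "  " then
    ((if acc.2 = "add" then acc.1 ++ [">>>>>>> UPDATED"]
      else if acc.2 = "del" then acc.1 ++ ["=======", ">>>>>>> UPDATED"]
      else acc.1) ++ [PySem.Str.slice line (some 2) none], "neutral")
  else if PySem.Str.startswith line "- " then
    ((if acc.2 = "neutral" then acc.1 ++ ["<<<<<<< ORIGINAL"]
      else if acc.2 = "add" then acc.1 ++ [">>>>>>> UPDATED", "<<<<<<< ORIGINAL"]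
      else acc.1) ++ [PySem.Str.slice line (some 2) none], "del")
  else if PySem.Str.startswith line "+ " then
    ((if acc.2 = "del" then acc.1 ++ ["======="]
      else if acc.2 = "neutral" then acc.1 ++ ["<<<<<<< ORIGINAL", "======="]
      else acc.1) ++ [PySem.Str.slice line (some 2) none], "add")
  else acc

-- A's final flush after the loop
def pvCloseA (acc : List String × String) : List String :=
  if acc.2 = "add" then acc.1 ++ [">>>>>>> UPDATED"]
  else if acc.2 = "del" then acc.1 ++ ["=======", ">>>>>>> UPDATED"]
  else acc.1

def git_conflict_format (diff_str : String) : String :=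
  -- sep "\n" ≠ "": split never raises
  PySem.Str.join "\n"
    (pvCloseA ((((PySem.Str.split? diff_str "\n").getD []).foldl pvStepA ([], "neutral"))))

-- ===== PORT B =====
-- first inner loop of Source B: collect stripped '- ' lines, return them with the unconsumed rest
def pvCollectDel : List String → List String × List String
  | [] => ([], [])
  | l :: ls =>
    if PySem.Str.startswith l "  " || PySem.Str.startswith l "+ " then ([], l :: ls)
    else
      let p := pvCollectDel ls
      (if PySem.Str.startswith l "- " then PySem.Str.slice l (some 2) none :: p.1 else p.1, p.2)

-- second inner loop of Source B: collect stripped '+ ' lines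
def pvCollectAdd : List String → List String × List String
  | [] => ([], [])
  | l :: ls =>
    if PySem.Str.startswith l "  " || PySem.Str.startswith l "- " then ([], l :: ls)
    else
      let p := pvCollectAdd ls
      (if PySem.Str.startswith l "+ " then PySem.Str.slice l (some 2) none :: p.1 else p.1, p.2)

lemma pvCollectDel_len (ls : List String) : (pvCollectDel ls).2.length ≤ ls.length := by
  induction ls with
  | nil => simp [pvCollectDel]
  | cons l ls ih =>
    simp only [pvCollectDel]
    split
    · simp
    · simpa using Nat.le_succ_of_le ih

lemma pvCollectAdd_len (ls : List String) : (pvCollectAdd ls).2.length ≤ ls.length := by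
  induction ls with
  | nil => simp [pvCollectAdd]
  | cons l ls ih =>
    simp only [pvCollectAdd]
    split
    · simp
    · simpa using Nat.le_succ_of_le ih

-- a line starting with "- " does not start with "+ " and vice versa
lemma pvMinusNotPlus (l : String) (h : PySem.Str.startswith l "- " = true) :
    PySem.Str.startswith l "+ " = false := by
  simp only [PySem.Str.startswith_eq] at h ⊢
  have e1 : ("- ").toList = ['-', ' '] := rfl
  have e2 : ("+ ").toList = ['+', ' '] := rfl
  rw [e1] at h; rw [e2]
  cases cs : l.toList with
  | nil => rw [cs] at h; simp [PySem.Chars.startswith, List.isPrefixOf] at h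
  | cons c cs' =>
    rw [cs] at h
    simp [PySem.Chars.startswith, List.isPrefixOf] at h ⊢
    intro hc; exact absurd (h.1.trans hc.symm) (by decide)

lemma pvPlusNotMinus (l : String) (h : PySem.Str.startswith l "+ " = true) :
    PySem.Str.startswith l "- " = false := by
  simp only [PySem.Str.startswith_eq] at h ⊢
  have e1 : ("+ ").toList = ['+', ' '] := rfl
  have e2 : ("- ").toList = ['-', ' '] := rfl
  rw [e1] at h; rw [e2]
  cases cs : l.toList with
  | nil => rw [cs] at h; simp [PySem.Chars.startswith, List.isPrefixOf] at h
  | cons c cs' =>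
    rw [cs] at h
    simp [PySem.Chars.startswith, List.isPrefixOf] at h ⊢
    intro hc; exact absurd (h.1.trans hc.symm) (by decide)

-- termination measure fact for pvGoB's block branch
lemma pvBlock_lt (l : String) (ls : List String)
    (h1 : PySem.Str.startswith l "  " = false)
    (h23 : PySem.Str.startswith l "- " = true ∨ PySem.Str.startswith l "+ " = true) :
    (pvCollectAdd (pvCollectDel (l :: ls)).2).2.length < (l :: ls).length := by
  rcases h23 with h2 | h3
  · have h3 : PySem.Str.startswith l "+ " = false := pvMinusNotPlus l h2
    have : (pvCollectDel (l :: ls)).2 = (pvCollectDel ls).2 := by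
      simp only [pvCollectDel, h1, h3, Bool.or_self, Bool.false_eq_true, if_false]
    rw [this]
    calc (pvCollectAdd (pvCollectDel ls).2).2.length
        ≤ (pvCollectDel ls).2.length := pvCollectAdd_len _
      _ ≤ ls.length := pvCollectDel_len _
      _ < (l :: ls).length := by simp
  · have h2 : PySem.Str.startswith l "- " = false := pvPlusNotMinus l h3
    have hd : (pvCollectDel (l :: ls)).2 = l :: ls := by
      simp only [pvCollectDel, h3, Bool.or_true, if_true]
    rw [hd]
    have ha : (pvCollectAdd (l :: ls)).2 = (pvCollectAdd ls).2 := by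
      simp only [pvCollectAdd, h1, h2, Bool.or_self, Bool.false_eq_true, if_false]
    rw [ha]
    calc (pvCollectAdd ls).2.length ≤ ls.length := pvCollectAdd_len _
      _ < (l :: ls).length := by simp

-- Source B's outer while loop
def pvGoB : List String → List String
  | [] => []
  | l :: ls =>
    if h1 : PySem.Str.startswith l "  " then
      PySem.Str.slice l (some 2) none :: pvGoB ls
    else if h23 : PySem.Str.startswith l "- " = true ∨ PySem.Str.startswith l "+ " = true then
      let p := pvCollectDel (l :: ls)
      let q := pvCollectAdd p.2
      "<<<<<<< ORIGINAL" :: (p.1 ++ "=======" :: (q.1 ++ ">>>>>>> UPDATED" :: pvGoB q.2))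
    else pvGoB ls
  termination_by ls => ls.length
  decreasing_by
  · simp
  · exact pvBlock_lt l ls (by simpa using h1) h23
  · simp

def git_conflict_format_alt (diff_str : String) : String :=
  PySem.Str.join "\n" (pvGoB ((PySem.Str.split? diff_str "\n").getD []))

-- ===== PRECONDITION & SPEC =====
def Spec_git_conflict_format (diff_str : String) (out : String) : Prop := out = git_conflict_format_alt diff_str
instance (diff_str : String) (out : String) : Decidable (Spec_git_conflict_format diff_str out) := by unfold Spec_git_conflict_format; infer_instance

-- ===== CLAIM (what is proved, stated in full; the proofs are below) =====
def Claim_equal_git_conflict_format : Prop := ∀ (diff_str : String), Dom_git_conflict_format diff_str → Spec_git_conflict_format diff_str (git_conflict_format diff_str)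

-- ===== LEMMAS AND PROOFS =====

-- reduced forms of one step of A's loop, by the head line's prefix
lemma pvStepA_ctx (l : String) (h : PySem.Str.startswith l "  " = true)
    (acc : List String × String) :
    pvStepA acc l =
      ((if acc.2 = "add" then acc.1 ++ [">>>>>>> UPDATED"]
        else if acc.2 = "del" then acc.1 ++ ["=======", ">>>>>>> UPDATED"]
        else acc.1) ++ [PySem.Str.slice l (some 2) none], "neutral") := by
  simp only [pvStepA, h, if_true]

lemma pvStepA_minus (l : String) (h1 : PySem.Str.startswith l "  " = false)
    (h2 : PySem.Str.startswith l "- " = true) (acc : List String × String) :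
    pvStepA acc l =
      ((if acc.2 = "neutral" then acc.1 ++ ["<<<<<<< ORIGINAL"]
        else if acc.2 = "add" then acc.1 ++ [">>>>>>> UPDATED", "<<<<<<< ORIGINAL"]
        else acc.1) ++ [PySem.Str.slice l (some 2) none], "del") := by
  simp only [pvStepA, h1, h2, Bool.false_eq_true, if_false, if_true]

lemma pvStepA_plus (l : String) (h1 : PySem.Str.startswith l "  " = false)
    (h2 : PySem.Str.startswith l "- " = false)
    (h3 : PySem.Str.startswith l "+ " = true) (acc : List String × String) :
    pvStepA acc l =
      ((if acc.2 = "del" then acc.1 ++ ["======="]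
        else if acc.2 = "neutral" then acc.1 ++ ["<<<<<<< ORIGINAL", "======="]
        else acc.1) ++ [PySem.Str.slice l (some 2) none], "add") := by
  simp only [pvStepA, h1, h2, h3, Bool.false_eq_true, if_false, if_true]

lemma pvStepA_skip (l : String) (h1 : PySem.Str.startswith l "  " = false)
    (h2 : PySem.Str.startswith l "- " = false)
    (h3 : PySem.Str.startswith l "+ " = false) (acc : List String × String) :
    pvStepA acc l = acc := by
  simp only [pvStepA, h1, h2, h3, Bool.false_eq_true, if_false]

-- A's fold, continued from each of the three states, expressed through B's block pieces.
lemma pvTriple (ls : List String) :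
    (∀ out : List String, pvCloseA (ls.foldl pvStepA (out, "neutral")) = out ++ pvGoB ls) ∧
    (∀ out : List String, pvCloseA (ls.foldl pvStepA (out, "del")) =
      out ++ (pvCollectDel ls).1 ++ "=======" ::
        ((pvCollectAdd (pvCollectDel ls).2).1 ++ ">>>>>>> UPDATED" ::
          pvGoB (pvCollectAdd (pvCollectDel ls).2).2)) ∧
    (∀ out : List String, pvCloseA (ls.foldl pvStepA (out, "add")) =
      out ++ (pvCollectAdd ls).1 ++ ">>>>>>> UPDATED" :: pvGoB (pvCollectAdd ls).2) := by
  induction ls with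
  | nil =>
    refine ⟨?_, ?_, ?_⟩ <;> intro out <;>
      simp [pvCloseA, pvCollectDel, pvCollectAdd, pvGoB]
  | cons l ls ih =>
    obtain ⟨IHn, IHd, IHa⟩ := ih
    by_cases h1 : PySem.Str.startswith l "  " = true
    · have h1' : PySem.Chars.startswith l.toList [' ', ' '] = true := by simpa using h1
      refine ⟨?_, ?_, ?_⟩ <;> intro out <;>
        simp [List.foldl_cons, pvStepA_ctx l h1, IHn, pvGoB, pvCollectDel, pvCollectAdd, h1']
    · rw [Bool.not_eq_true] at h1
      have h1' : PySem.Chars.startswith l.toList [' ', ' '] = false := by simpa using h1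
      by_cases h2 : PySem.Str.startswith l "- " = true
      · have h3 := pvMinusNotPlus l h2
        have h2' : PySem.Chars.startswith l.toList ['-', ' '] = true := by simpa using h2
        have h3' : PySem.Chars.startswith l.toList ['+', ' '] = false := by simpa using h3
        refine ⟨?_, ?_, ?_⟩ <;> intro out <;>
          simp [List.foldl_cons, pvStepA_minus l h1 h2, IHd, pvGoB, pvCollectDel, pvCollectAdd,
            h1', h2', h3']
      · rw [Bool.not_eq_true] at h2
        have h2' : PySem.Chars.startswith l.toList ['-', ' '] = false := by simpa using h2
        by_cases h3 : PySem.Str.startswith l "+ " = true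
        · have h3' : PySem.Chars.startswith l.toList ['+', ' '] = true := by simpa using h3
          refine ⟨?_, ?_, ?_⟩ <;> intro out <;>
            simp [List.foldl_cons, pvStepA_plus l h1 h2 h3, IHa, pvGoB, pvCollectDel,
              pvCollectAdd, h1', h2', h3']
        · rw [Bool.not_eq_true] at h3
          have h3' : PySem.Chars.startswith l.toList ['+', ' '] = false := by simpa using h3
          refine ⟨?_, ?_, ?_⟩ <;> intro out <;>
            simp [List.foldl_cons, pvStepA_skip l h1 h2 h3, IHn, IHd, IHa, pvGoB, pvCollectDel,
              pvCollectAdd, h1', h2', h3']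

theorem pv_main (lines : List String) :
    pvCloseA (lines.foldl pvStepA ([], "neutral")) = pvGoB lines := by
  simpa using (pvTriple lines).1 []

-- ===== VERDICT (by name: the statement is the Claim_ definition above) =====
theorem git_conflict_format_spec : Claim_equal_git_conflict_format := by
  intro diff_str _
  unfold Spec_git_conflict_format git_conflict_format git_conflict_format_alt
  rw [pv_main]
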